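-- pv_equiv track=rewrite | github.com/Centrattic/cot-proxy-tasks | src/tasks/self_deletion/run_build_probe_dataset.py | truncate_to_n_assistant_turns
-- ===== SOURCE A (Python) =====
-- def truncate_to_n_assistant_turns(messages: list[dict], n: int) -> list[dict]:
--     """Truncate a message list to exactly n assistant turns.
--
--     Keeps all user/assistant pairs up to the nth assistant message.
--     """
--     count = 0
--     for i, m in enumerate(messages):
--         if m.get("role") == "assistant":
--             count += 1
--             if count == n:
--                 return messages[:i + 1]
--     return messages  # fewer than n turns, return all
-- ===== SOURCE B (Python) =====
-- def truncate_to_n_assistant_turns(messages: list[dict], n: int) -> list[dict]: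
--     """Truncate a message list to exactly n assistant turns.
--
--     Index-then-slice: collect the positions of all assistant messages once,
--     then slice up to the n-th one (everything if n is out of range).
--     """
--     idx = [i for i, m in enumerate(messages) if m.get("role") == "assistant"]
--     if 1 <= n <= len(idx):
--         return messages[:idx[n - 1] + 1]
--     return messages
-- ===== Notes on version B (the rewrite author's own statement) =====
-- stated objective: alternative
-- what changed: Replaces A's counting scan with an early return by a comprehension that collects all assistant-message indices first and then a single guarded slice messages[:idx[n-1]+1].
import Mathlib
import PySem

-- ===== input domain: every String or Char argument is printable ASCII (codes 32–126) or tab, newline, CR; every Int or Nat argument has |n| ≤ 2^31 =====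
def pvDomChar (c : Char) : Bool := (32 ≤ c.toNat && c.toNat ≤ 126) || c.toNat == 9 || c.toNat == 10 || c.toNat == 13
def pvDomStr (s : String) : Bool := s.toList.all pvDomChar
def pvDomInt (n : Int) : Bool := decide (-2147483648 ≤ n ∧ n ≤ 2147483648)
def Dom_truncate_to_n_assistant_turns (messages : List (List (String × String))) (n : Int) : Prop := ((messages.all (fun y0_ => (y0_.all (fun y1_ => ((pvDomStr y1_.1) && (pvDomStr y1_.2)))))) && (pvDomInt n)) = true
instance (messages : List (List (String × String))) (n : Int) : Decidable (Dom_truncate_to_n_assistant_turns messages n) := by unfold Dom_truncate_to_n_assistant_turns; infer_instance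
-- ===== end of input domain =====

-- B replaces A's counting scan with an index-list comprehension plus one guarded slice (objective: alternative).

-- ===== PORT A =====
-- A's for-loop with an early 'return messages[:i+1]': the recursion returns 'some prefix'
-- when the nth assistant turn is found (building messages[:i+1] by consing the already
-- traversed elements back on), 'none' when the loop falls through; the wrapper then
-- returns the prefix or, on none, the whole list — exactly A's control flow.
def pvGoA : List (List (String × String)) → Int → Int → Option (List (List (String × String)))
  | [], _, _ => none
  | m :: rest, n, count =>
    if (PySem.Dict.mk m).get? "role" == some "assistant" then
      if count + 1 == n then some [m]
      else (pvGoA rest n (count + 1)).map (m :: ·)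
    else (pvGoA rest n count).map (m :: ·)

def truncate_to_n_assistant_turns (messages : List (List (String × String))) (n : Int) : List (List (String × String)) :=
  (pvGoA messages n 0).getD messages

-- ===== PORT B =====
def truncate_to_n_assistant_turns_alt (messages : List (List (String × String))) (n : Int) : List (List (String × String)) :=
  let idx : List Int :=
    ((PySem.List.enumerate messages 0).filter
      (fun p => (PySem.Dict.mk p.2).get? "role" == some "assistant")).map (·.1)
  if 1 ≤ n ∧ n ≤ (idx.length : Int) then
    PySem.List.slice messages none (some (PySem.List.pyGetD idx (n - 1) 0 + 1))
  else messages

-- ===== PRECONDITION & SPEC =====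
def Spec_truncate_to_n_assistant_turns (messages : List (List (String × String))) (n : Int) (out : List (List (String × String))) : Prop := out = truncate_to_n_assistant_turns_alt messages n
instance (messages : List (List (String × String))) (n : Int) (out : List (List (String × String))) : Decidable (Spec_truncate_to_n_assistant_turns messages n out) := by unfold Spec_truncate_to_n_assistant_turns; infer_instance

-- ===== CLAIM (what is proved, stated in full; the proofs are below) =====
def Claim_equal_truncate_to_n_assistant_turns : Prop := ∀ (messages : List (List (String × String))) (n : Int), Dom_truncate_to_n_assistant_turns messages n → Spec_truncate_to_n_assistant_turns messages n (truncate_to_n_assistant_turns messages n)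

-- ===== LEMMAS AND PROOFS =====

-- nat-valued assistant index positions (proof helper)
def pvAidx : List (List (String × String)) → List Nat
  | [] => []
  | m :: rest =>
    if (PySem.Dict.mk m).get? "role" == some "assistant"
    then 0 :: (pvAidx rest).map (· + 1)
    else (pvAidx rest).map (· + 1)

lemma pvIdx_eq_aidx (msgs : List (List (String × String))) (s : Int) :
    ((PySem.List.enumerate msgs s).filter
      (fun p => (PySem.Dict.mk p.2).get? "role" == some "assistant")).map (·.1)
    = (pvAidx msgs).map (fun k : Nat => ((k : Int) + s)) := by
  induction msgs generalizing s with
  | nil => simp [PySem.List.enumerate_nil, pvAidx]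
  | cons m rest ih =>
    simp only [PySem.List.enumerate_cons, List.filter_cons, pvAidx]
    by_cases h : (PySem.Dict.mk m).get? "role" = some "assistant" <;>
      simp [h, ih (s + 1)] <;> (intro a _; ring)

lemma pvGoA_key (msgs : List (List (String × String))) (n : Int) : ∀ count : Int,
    (pvGoA msgs n count).getD msgs =
      (if 1 ≤ n - count ∧ n - count ≤ ((pvAidx msgs).length : Int) then
        msgs.take ((pvAidx msgs).getD (n - count - 1).toNat 0 + 1)
      else msgs) := by
  induction msgs with
  | nil => intro count; simp [pvGoA, pvAidx]
  | cons m rest ih =>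
    intro count
    by_cases h : (PySem.Dict.mk m).get? "role" = some "assistant"
    · have e2 : pvAidx (m :: rest) = 0 :: (pvAidx rest).map (· + 1) := by simp [pvAidx, h]
      by_cases hn : count + 1 = n
      · have e1 : pvGoA (m :: rest) n count = some [m] := by simp [pvGoA, h, hn]
        rw [e1, e2]
        rw [if_pos ⟨by omega, by simp only [List.length_cons, List.length_map]; push_cast; omega⟩]
        have h1 : (n - count - 1).toNat = 0 := by omega
        simp [h1]
      · have e1 : pvGoA (m :: rest) n count = (pvGoA rest n (count + 1)).map (m :: ·) := by
          simp [pvGoA, h, hn]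
        rw [e1, e2]
        have hget : ((pvGoA rest n (count + 1)).map (m :: ·)).getD (m :: rest)
            = m :: (pvGoA rest n (count + 1)).getD rest := by
          cases pvGoA rest n (count + 1) <;> simp
        rw [hget, ih (count + 1)]
        by_cases hc : 1 ≤ n - (count + 1) ∧ n - (count + 1) ≤ ((pvAidx rest).length : Int)
        · rw [if_pos hc,
            if_pos (show 1 ≤ n - count ∧ n - count ≤ (((0 :: (pvAidx rest).map (· + 1)).length : Nat) : Int) by
              refine ⟨by omega, ?_⟩
              simp only [List.length_cons, List.length_map]; push_cast; omega)]
          have hk : (n - count - 1).toNat = (n - (count + 1) - 1).toNat + 1 := by omega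
          have hlt : (n - (count + 1) - 1).toNat < (pvAidx rest).length := by omega
          rw [List.getD_eq_getElem (pvAidx rest) 0 hlt, hk, List.getD_cons_succ,
              List.getD_eq_getElem (List.map (fun x => x + 1) (pvAidx rest)) 0
                (by simpa using hlt),
              List.getElem_map]
          rfl
        · rw [if_neg hc, if_neg ?side]
          case side =>
            simp only [List.length_cons, List.length_map]
            push_cast
            omega
    · have e2 : pvAidx (m :: rest) = (pvAidx rest).map (· + 1) := by simp [pvAidx, h]
      have e1 : pvGoA (m :: rest) n count = (pvGoA rest n count).map (m :: ·) := by
        simp [pvGoA, h]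
      rw [e1, e2]
      have hget : ((pvGoA rest n count).map (m :: ·)).getD (m :: rest)
          = m :: (pvGoA rest n count).getD rest := by
        cases pvGoA rest n count <;> simp
      rw [hget, ih count]
      by_cases hc : 1 ≤ n - count ∧ n - count ≤ ((pvAidx rest).length : Int)
      · rw [if_pos hc,
          if_pos (show 1 ≤ n - count ∧ n - count ≤ ((((pvAidx rest).map (· + 1)).length : Nat) : Int) by
            refine ⟨hc.1, ?_⟩
            simp only [List.length_map]; exact hc.2)]
        have hlt : (n - count - 1).toNat < (pvAidx rest).length := by omega
        rw [List.getD_eq_getElem (pvAidx rest) 0 hlt,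
            List.getD_eq_getElem (List.map (fun x => x + 1) (pvAidx rest)) 0
              (by simpa using hlt),
            List.getElem_map]
        rfl
      · rw [if_neg hc, if_neg ?side2]
        case side2 =>
          simp only [List.length_map]
          exact hc

lemma pvAlt_eq (msgs : List (List (String × String))) (n : Int) :
    truncate_to_n_assistant_turns_alt msgs n =
      (if 1 ≤ n ∧ n ≤ ((pvAidx msgs).length : Int) then
        msgs.take ((pvAidx msgs).getD (n - 1).toNat 0 + 1)
      else msgs) := by
  unfold truncate_to_n_assistant_turns_alt
  rw [pvIdx_eq_aidx msgs 0]
  simp only [List.length_map]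
  by_cases hc : 1 ≤ n ∧ n ≤ ((pvAidx msgs).length : Int)
  · rw [if_pos hc, if_pos hc]
    have hlt : (n - 1).toNat < (pvAidx msgs).length := by omega
    rw [PySem.List.pyGetD_eq_getElem (List.map (fun k : Nat => ((k : Int) + 0)) (pvAidx msgs)) 0
          (by omega) (by simp only [List.length_map]; omega),
        List.getElem_map]
    have hcast : ((((pvAidx msgs)[(n - 1).toNat] : Nat) : Int) + 0) + 1
        = ((((pvAidx msgs)[(n - 1).toNat] + 1 : Nat) : Nat) : Int) := by push_cast; ring
    rw [hcast, PySem.List.slice_to_natCast, List.getD_eq_getElem _ _ hlt]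
  · rw [if_neg hc, if_neg hc]

-- ===== VERDICT (by name: the statement is the Claim_ definition above) =====
theorem truncate_to_n_assistant_turns_spec : Claim_equal_truncate_to_n_assistant_turns := by
  intro messages n _
  unfold Spec_truncate_to_n_assistant_turns truncate_to_n_assistant_turns
  rw [pvAlt_eq, pvGoA_key]
  norm_num
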